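-- pv_equiv track=rewrite | github.com/Les-Sherpas/ai-sync | src/ai_sync/services/one_password_sdk_service.py | _inject_resolved
-- ===== SOURCE A (Python) =====
-- def _inject_resolved(
--     lines: list[str], line_to_ref: dict[int, str], resolved: dict[str, str]
-- ) -> str:
--     out: list[str] = []
--     for idx, line in enumerate(lines):
--         if idx in line_to_ref:
--             ref = line_to_ref[idx]
--             name = line.split("=", 1)[0].strip()
--             out.append(f"{name}={resolved.get(ref, ref)}")
--         else:
--             out.append(line)
--     return "\n".join(out)
-- ===== SOURCE B (Python) =====
-- def _inject_resolved(
--     lines: list[str], line_to_ref: dict[int, str], resolved: dict[str, str]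
-- ) -> str:
--     out = list(lines)
--     for idx, ref in line_to_ref.items():
--         if 0 <= idx < len(lines):
--             name = lines[idx].split("=", 1)[0].strip()
--             out[idx] = f"{name}={resolved.get(ref, ref)}"
--     return "\n".join(out)
-- ===== Notes on version B (the rewrite author's own statement) =====
-- stated objective: alternative
-- what changed: B copies the lines and drives the loop from the reference map, patching only the flagged positions in place, instead of scanning every line and testing membership in the map.
import Mathlib
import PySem

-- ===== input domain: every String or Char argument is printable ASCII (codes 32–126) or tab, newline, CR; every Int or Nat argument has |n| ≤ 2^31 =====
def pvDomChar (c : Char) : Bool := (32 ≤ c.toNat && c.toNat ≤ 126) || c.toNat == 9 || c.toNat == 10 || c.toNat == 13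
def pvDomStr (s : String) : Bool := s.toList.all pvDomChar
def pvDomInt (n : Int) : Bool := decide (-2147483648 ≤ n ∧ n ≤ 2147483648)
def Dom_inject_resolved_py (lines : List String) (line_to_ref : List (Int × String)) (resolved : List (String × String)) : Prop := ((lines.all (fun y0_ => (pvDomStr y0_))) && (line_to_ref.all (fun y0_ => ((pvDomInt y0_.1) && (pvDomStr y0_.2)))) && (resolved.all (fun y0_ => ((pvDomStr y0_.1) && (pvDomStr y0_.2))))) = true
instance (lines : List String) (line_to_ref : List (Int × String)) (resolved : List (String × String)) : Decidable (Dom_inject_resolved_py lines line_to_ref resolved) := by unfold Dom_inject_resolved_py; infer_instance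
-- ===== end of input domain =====

-- B rebuilds the text by patching a copy of the lines, driven by the reference map,
-- instead of A's scan over every line with a membership test; objective: alternative decomposition.

-- shared helper: line.split("=", 1)[0].strip()  (identical expression in both Pythons)
def pvName (line : String) : String :=
  PySem.Str.strip (((PySem.Str.splitMax? line "=" 1).getD []).headD "")

-- ===== PORT A =====
def inject_resolved_py (lines : List String) (line_to_ref : List (Int × String)) (resolved : List (String × String)) : String :=
  let d := PySem.Dict.mk line_to_ref
  let r := PySem.Dict.mk resolved
  let out : List String := (PySem.List.enumerate lines).foldl (fun out p =>
    if d.contains p.1 then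
      let ref := (d.get? p.1).getD ""
      out ++ [pvName p.2 ++ "=" ++ r.getD ref ref]
    else
      out ++ [p.2]) []
  PySem.Str.join "\n" out

-- ===== PORT B =====
def inject_resolved_py_alt (lines : List String) (line_to_ref : List (Int × String)) (resolved : List (String × String)) : String :=
  let r := PySem.Dict.mk resolved
  let out : List String := line_to_ref.foldl (fun out p =>
    if 0 ≤ p.1 ∧ p.1 < (lines.length : Int) then
      out.set p.1.toNat (pvName (lines.getD p.1.toNat "") ++ "=" ++ r.getD p.2 p.2)
    else out) lines
  PySem.Str.join "\n" out

-- ===== PRECONDITION & SPEC =====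
-- Pre_ excludes association lists line_to_ref with duplicate keys: a Python dict cannot contain
-- duplicate keys, so such lists correspond to no Python input; on them first-vs-last match is accidental.
def Pre_inject_resolved_py (lines : List String) (line_to_ref : List (Int × String)) (resolved : List (String × String)) : Prop :=
  (line_to_ref.map Prod.fst).Nodup
instance (lines : List String) (line_to_ref : List (Int × String)) (resolved : List (String × String)) : Decidable (Pre_inject_resolved_py lines line_to_ref resolved) := by unfold Pre_inject_resolved_py; infer_instance
def pvWitness_inject_resolved_py : List String × (List (Int × String)) × (List (String × String)) :=
  (["A = op://v/x", "B=2"], [(0, "op://v/x")], [("op://v/x", "secret")])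

def Spec_inject_resolved_py (lines : List String) (line_to_ref : List (Int × String)) (resolved : List (String × String)) (out : String) : Prop := out = inject_resolved_py_alt lines line_to_ref resolved
instance (lines : List String) (line_to_ref : List (Int × String)) (resolved : List (String × String)) (out : String) : Decidable (Spec_inject_resolved_py lines line_to_ref resolved out) := by unfold Spec_inject_resolved_py; infer_instance

-- ===== CLAIM (what is proved, stated in full; the proofs are below) =====
def Claim_equal_inject_resolved_py : Prop := ∀ (lines : List String) (line_to_ref : List (Int × String)) (resolved : List (String × String)), Dom_inject_resolved_py lines line_to_ref resolved → Pre_inject_resolved_py lines line_to_ref resolved → Spec_inject_resolved_py lines line_to_ref resolved (inject_resolved_py lines line_to_ref resolved)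

-- ===== LEMMAS AND PROOFS =====

-- the value both programs write at a flagged position
def pvPatch (lines : List String) (resolved : List (String × String)) (k : Nat) (ref : String) : String :=
  pvName (lines.getD k "") ++ "=" ++ (PySem.Dict.mk resolved).getD ref ref

theorem pv_length_foldl_set (lines : List String) (resolved : List (String × String)) (ltr : List (Int × String)) (acc : List String) :
    (ltr.foldl (fun out p =>
      if 0 ≤ p.1 ∧ p.1 < (lines.length : Int) then
        out.set p.1.toNat (pvPatch lines resolved p.1.toNat p.2)
      else out) acc).length = acc.length := by
  induction ltr generalizing acc with
  | nil => rfl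
  | cons h t ih => simp only [List.foldl_cons]; split <;> simp [ih]

-- what A appends for the line at each enumerated position
def pvF (lines : List String) (ltr : List (Int × String)) (resolved : List (String × String)) (p : Int × String) : String :=
  if (PySem.Dict.mk ltr).contains p.1 then
    pvName p.2 ++ "=" ++ (PySem.Dict.mk resolved).getD (((PySem.Dict.mk ltr).get? p.1).getD "") (((PySem.Dict.mk ltr).get? p.1).getD "")
  else p.2

-- characterisation of B's patch loop at each index, for nodup keys
theorem pv_foldl_set_getElem? (lines : List String) (resolved : List (String × String)) (ltr : List (Int × String))
    (hnd : (ltr.map Prod.fst).Nodup) (acc : List String) (hlen : acc.length = lines.length) (i : Nat) (hi : i < lines.length) :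
    (ltr.foldl (fun out p =>
      if 0 ≤ p.1 ∧ p.1 < (lines.length : Int) then
        out.set p.1.toNat (pvPatch lines resolved p.1.toNat p.2)
      else out) acc)[i]? =
    match (PySem.Dict.mk ltr).get? (i : Int) with
    | some ref => some (pvPatch lines resolved i ref)
    | none => acc[i]? := by
  induction ltr generalizing acc with
  | nil => simp [PySem.Dict.get?]
  | cons h t ih =>
      obtain ⟨k, v⟩ := h
      simp only [List.map_cons, List.nodup_cons] at hnd
      obtain ⟨hk, hnd'⟩ := hnd
      simp only [List.foldl_cons, PySem.Dict.get?_mk_cons]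
      by_cases hki : k = (i : Int)
      · subst hki
        have hguard : (0 ≤ ((i : Int)) ∧ ((i : Int)) < (lines.length : Int)) := by
          constructor
          · exact_mod_cast Int.natCast_nonneg i
          · exact_mod_cast hi
        rw [if_pos hguard]
        have hnone : (PySem.Dict.mk t).get? ((i : Int)) = none := by
          rw [PySem.Dict.get?_eq_none_iff_not_mem_keys]
          simpa using hk
        rw [ih hnd' _ (by simpa using hlen), hnone]
        simp only [beq_self_eq_true, if_pos]
        have hset : (acc.set ((i : Int)).toNat (pvPatch lines resolved ((i : Int)).toNat v))[i]? = some (pvPatch lines resolved i v) := by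
          simp only [Int.toNat_natCast]
          simp [hlen, hi]
        rw [hset]
      · have hbeq : (k == (i : Int)) = false := by simpa using hki
        rw [hbeq]
        simp only [Bool.false_eq_true, if_false]
        by_cases hg : (0 ≤ k ∧ k < (lines.length : Int))
        · rw [if_pos hg, ih hnd' _ (by simpa using hlen)]
          have hne : k.toNat ≠ i := by omega
          rw [List.getElem?_set_ne hne]
        · rw [if_neg hg, ih hnd' _ hlen]

-- ===== VERDICT (by name: the statement is the Claim_ definition above) =====
theorem inject_resolved_py_spec : Claim_equal_inject_resolved_py := by
  intro lines ltr resolved _hdom hpre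
  unfold Spec_inject_resolved_py inject_resolved_py inject_resolved_py_alt
  simp only []
  congr 1
  -- the two intermediate lists are equal
  have hstep : (fun (out : List String) (p : Int × String) =>
      if (PySem.Dict.mk ltr).contains p.1 then
        out ++ [pvName p.2 ++ "=" ++ (PySem.Dict.mk resolved).getD (((PySem.Dict.mk ltr).get? p.1).getD "") (((PySem.Dict.mk ltr).get? p.1).getD "")]
      else out ++ [p.2]) =
      (fun (out : List String) (p : Int × String) => out ++ [pvF lines ltr resolved p]) := by
    funext out p
    by_cases hc : (PySem.Dict.mk ltr).contains p.1 = true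
    · simp [pvF, hc]
    · simp only [Bool.not_eq_true] at hc
      simp [pvF, hc]
  rw [hstep, PySem.List.foldl_append_singleton_eq_map, List.nil_append]
  apply List.ext_getElem?
  intro i
  by_cases hi : i < lines.length
  · rw [List.getElem?_map, PySem.List.getElem?_enumerate]
    have hB := pv_foldl_set_getElem? lines resolved ltr hpre lines rfl i hi
    have hBalt : (ltr.foldl (fun out p =>
        if 0 ≤ p.1 ∧ p.1 < (lines.length : Int) then
          out.set p.1.toNat (pvName (lines.getD p.1.toNat "") ++ "=" ++ (PySem.Dict.mk resolved).getD p.2 p.2)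
        else out) lines)[i]? =
        match (PySem.Dict.mk ltr).get? (i : Int) with
        | some ref => some (pvPatch lines resolved i ref)
        | none => lines[i]? := hB
    rw [hBalt]
    cases hget : (PySem.Dict.mk ltr).get? (i : Int) with
    | some ref =>
        have hcon : (PySem.Dict.mk ltr).contains ((i : Int)) = true := by
          rw [PySem.Dict.contains_eq_isSome_get?, hget]; rfl
        rw [List.getElem?_eq_getElem hi]
        simp only [Option.map_some, pvF, zero_add, hcon, if_true, hget, Option.getD_some,
          pvPatch, Option.some.injEq]
        simp [List.getElem?_eq_getElem hi]
    | none =>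
        have hcon : (PySem.Dict.mk ltr).contains ((i : Int)) = false := by
          rw [PySem.Dict.contains_eq_isSome_get?, hget]; rfl
        rw [List.getElem?_eq_getElem hi]
        simp only [Option.map_some, pvF, zero_add]
        rw [hcon]
        simp
  · have h1 : i ≥ ((PySem.List.enumerate lines 0).map (pvF lines ltr resolved)).length := by
      simp [PySem.List.length_enumerate]; omega
    have h2 : i ≥ (ltr.foldl (fun out p =>
        if 0 ≤ p.1 ∧ p.1 < (lines.length : Int) then
          out.set p.1.toNat (pvName (lines.getD p.1.toNat "") ++ "=" ++ (PySem.Dict.mk resolved).getD p.2 p.2)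
        else out) lines).length := by
      have := pv_length_foldl_set lines resolved ltr lines
      simp only [pvPatch] at this
      omega
    rw [List.getElem?_eq_none (by omega), List.getElem?_eq_none (by omega)]
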